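-- pv_equiv track=rewrite | github.com/DagMalstaf/SMTP-POP3-MailServer-MailClient | pop_server.py | get_messages_list
-- ===== SOURCE A (Python) =====
-- def get_messages_list(mailbox: list[str]) -> list[str]:
--     messages = []
--     current_message = ""
--     for line in mailbox:
--         if line.strip() == "":
--             if current_message != "":
--                 messages.append(current_message.strip())
--                 current_message = ""
--         else:
--             current_message += line
--     if current_message != "":
--         messages.append(current_message.strip())
--
--     return messages
-- ===== SOURCE B (Python) =====
-- from itertools import groupby
--
--
-- def get_messages_list(mailbox: list[str]) -> list[str]:
--     return [''.join(run).strip()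
--             for blank, run in groupby(mailbox, key=lambda line: line.strip() == '')
--             if not blank]
-- ===== Notes on version B (the rewrite author's own statement) =====
-- stated objective: idiomatic
-- what changed: Replaces the manual accumulate-and-flush state machine (with its duplicated end-of-loop flush) by an itertools.groupby pipeline that partitions the lines into blank/non-blank runs and joins+strips each non-blank run.
import Mathlib
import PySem

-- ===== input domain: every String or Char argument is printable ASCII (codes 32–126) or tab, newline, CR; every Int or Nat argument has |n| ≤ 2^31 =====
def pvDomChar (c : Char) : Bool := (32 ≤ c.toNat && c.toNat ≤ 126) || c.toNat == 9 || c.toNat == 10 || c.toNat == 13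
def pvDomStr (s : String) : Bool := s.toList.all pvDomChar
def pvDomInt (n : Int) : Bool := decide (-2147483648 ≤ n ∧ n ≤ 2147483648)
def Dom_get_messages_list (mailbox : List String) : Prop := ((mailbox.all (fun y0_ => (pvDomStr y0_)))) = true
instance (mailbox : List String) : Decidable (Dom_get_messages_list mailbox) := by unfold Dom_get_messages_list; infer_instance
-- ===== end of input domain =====

-- B replaces A's accumulate-and-flush state machine (with its duplicated final flush) by a
-- groupby-style pipeline over maximal non-blank runs; objective: idiomatic, same cost.

-- ===== PORT A =====
-- one step of A's for-loop: state = (messages, current_message)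
def pvStepA (st : List String × String) (line : String) : List String × String :=
  if PySem.Str.strip line == "" then
    if st.2 ≠ "" then (st.1 ++ [PySem.Str.strip st.2], "") else st
  else (st.1, st.2 ++ line)

def get_messages_list (mailbox : List String) : List String :=
  let st := mailbox.foldl pvStepA ([], "")
  if st.2 ≠ "" then st.1 ++ [PySem.Str.strip st.2] else st.1

-- ===== PORT B =====
-- the groupby key: is this line blank?  (key=lambda line: line.strip() == '')
def pvBlank (line : String) : Bool := PySem.Str.strip line == ""

-- transcription of itertools.groupby + the comprehension: a blank-keyed group is skipped,
-- a non-blank run is taken maximally (takeWhile/dropWhile), joined with '' and stripped.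
def pvGroups : List String → List String
  | [] => []
  | l :: ls =>
    if pvBlank l then pvGroups ls
    else
      PySem.Str.strip (PySem.Str.join "" (l :: ls.takeWhile (fun x => !pvBlank x)))
        :: pvGroups (ls.dropWhile (fun x => !pvBlank x))
termination_by ls => ls.length
decreasing_by
  all_goals
    have h := List.length_dropWhile_le (fun x => !pvBlank x) ls
    simp only [List.length_cons]
    omega

def get_messages_list_alt (mailbox : List String) : List String := pvGroups mailbox

-- ===== PRECONDITION & SPEC =====
def Spec_get_messages_list (mailbox : List String) (out : List String) : Prop := out = get_messages_list_alt mailbox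
instance (mailbox : List String) (out : List String) : Decidable (Spec_get_messages_list mailbox out) := by unfold Spec_get_messages_list; infer_instance

-- ===== CLAIM (what is proved, stated in full; the proofs are below) =====
def Claim_equal_get_messages_list : Prop := ∀ (mailbox : List String), Dom_get_messages_list mailbox → Spec_get_messages_list mailbox (get_messages_list mailbox)

-- ===== LEMMAS AND PROOFS =====

-- A's trailing flush, as a function of the loop state
def pvFinA (st : List String × String) : List String :=
  if st.2 ≠ "" then st.1 ++ [PySem.Str.strip st.2] else st.1

theorem pvJoin_cons (x : String) (xs : List String) :
    PySem.Str.join "" (x :: xs) = x ++ PySem.Str.join "" xs := by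
  unfold PySem.Str.join
  cases xs with
  | nil => simp [PySem.Chars.join_singleton, PySem.Chars.join_nil]
  | cons y ys =>
      simp only [List.map_cons, show ("" : String).toList = [] from rfl, PySem.Chars.join_cons_cons]
      simp

theorem pvAppend_ne_empty (a b : String) (h : b ≠ "") : a ++ b ≠ "" := by
  intro hc; simp at hc; exact h hc.2

theorem pvStrip_empty : PySem.Str.strip "" = "" := by decide

-- the loop invariant: A's loop + final flush, started in state (msgs, cur), produces
-- msgs ++ (the groupby result), with a nonempty cur absorbed into the first pending run
theorem pvLoop_eq (ls : List String) :
    (∀ msgs : List String, pvFinA (ls.foldl pvStepA (msgs, "")) = msgs ++ pvGroups ls)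
    ∧ (∀ (msgs : List String) (cur : String), cur ≠ "" →
        pvFinA (ls.foldl pvStepA (msgs, cur))
          = msgs ++ PySem.Str.strip (cur ++ PySem.Str.join "" (ls.takeWhile (fun x => !pvBlank x)))
              :: pvGroups (ls.dropWhile (fun x => !pvBlank x))) := by
  induction ls with
  | nil =>
      constructor
      · intro msgs; simp [pvFinA, pvGroups]
      · intro msgs cur hcur
        simp [pvFinA, hcur, pvGroups, PySem.Str.join, PySem.Chars.join_nil]
  | cons l ls ih =>
      constructor
      · intro msgs
        rw [List.foldl_cons]
        by_cases hb : pvBlank l = true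
        · have hstep : pvStepA (msgs, "") l = (msgs, "") := by
            simp [pvStepA, pvBlank] at hb ⊢; simp [hb]
          rw [hstep, ih.1, pvGroups, if_pos hb]
        · have hlne : l ≠ "" := by
            intro h0; apply hb; simp [pvBlank, h0, pvStrip_empty]
          have hstep : pvStepA (msgs, "") l = (msgs, l) := by
            simp [pvStepA, pvBlank] at hb ⊢; simp [hb]
          rw [hstep, ih.2 msgs l hlne, pvGroups, if_neg (by simp [hb]), pvJoin_cons]
      · intro msgs cur hcur
        rw [List.foldl_cons]
        by_cases hb : pvBlank l = true
        · have hstep : pvStepA (msgs, cur) l = (msgs ++ [PySem.Str.strip cur], "") := by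
            simp [pvStepA, pvBlank] at hb ⊢; simp [hb, hcur]
          rw [hstep, ih.1]
          simp [pvGroups, hb, PySem.Str.join, PySem.Chars.join_nil]
        · have hlne : l ≠ "" := by
            intro h0; apply hb; simp [pvBlank, h0, pvStrip_empty]
          have hstep : pvStepA (msgs, cur) l = (msgs, cur ++ l) := by
            simp [pvStepA, pvBlank] at hb ⊢; simp [hb]
          rw [hstep, ih.2 msgs (cur ++ l) (pvAppend_ne_empty cur l hlne)]
          rw [List.takeWhile_cons, List.dropWhile_cons]
          simp only [hb, Bool.not_false, if_pos, pvJoin_cons, String.append_assoc]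

-- ===== VERDICT (by name: the statement is the Claim_ definition above) =====
theorem get_messages_list_spec : Claim_equal_get_messages_list := by
  intro mailbox _
  unfold Spec_get_messages_list get_messages_list get_messages_list_alt
  simpa [pvFinA] using (pvLoop_eq mailbox).1 []
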